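-- pv_equiv track=rewrite | github.com/code-dot-org/code-dot-org | flask/rubric/src/blocky_utils/autoIndent.py | autoIndent
-- ===== SOURCE A (Python) =====
-- def autoIndent(codeStr):
--     lines = codeStr.split('\n')
--     newCodeStr = ''
--     indentLevel = 0
--     for line in lines:
--         cleanLine = line.strip()
--         if cleanLine == '':continue
--         if cleanLine[0] == '}':
--             indentLevel -= 1
--         indentSpace = _makeIndentSpace(indentLevel)
--         newLine = indentSpace + cleanLine
--         newCodeStr += newLine + '\n'
--         if cleanLine[-1] == '{':
--             indentLevel += 1
--     return newCodeStr.strip()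
--
-- def _makeIndentSpace(level):
--     return '  ' * level
-- ===== SOURCE B (Python) =====
-- def autoIndent(codeStr):
--     lines = [s for s in map(str.strip, codeStr.split('\n')) if s]
--     closes = [1 if l[0] == '}' else 0 for l in lines]
--     deltas = [(1 if l[-1] == '{' else 0) - c for l, c in zip(lines, closes)]
--     out = ['  ' * (sum(deltas[:i]) - closes[i]) + lines[i]
--            for i in range(len(lines))]
--     return '\n'.join(out).strip()
-- ===== Notes on version B (the rewrite author's own statement) =====
-- stated objective: alternative
-- what changed: A's single stateful loop that mutates an indent level and concatenates into one growing string is replaced by a table decomposition: filter to the stripped non-empty lines, compute per-line close/delta tables, render line i with indent sum(deltas[:i]) - closes[i], then join with newlines.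
import Mathlib
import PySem

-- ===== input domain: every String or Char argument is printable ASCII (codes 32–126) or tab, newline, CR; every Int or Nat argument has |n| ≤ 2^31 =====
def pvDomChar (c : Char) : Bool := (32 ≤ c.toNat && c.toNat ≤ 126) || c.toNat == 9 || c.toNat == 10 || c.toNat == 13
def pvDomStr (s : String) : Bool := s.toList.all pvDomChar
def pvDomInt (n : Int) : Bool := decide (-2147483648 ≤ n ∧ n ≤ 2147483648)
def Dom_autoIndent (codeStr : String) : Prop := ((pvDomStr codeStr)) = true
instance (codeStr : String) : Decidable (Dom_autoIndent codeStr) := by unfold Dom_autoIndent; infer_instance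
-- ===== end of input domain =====

-- B replaces A's stateful accumulating loop by a delta-table + prefix-sum rendering of the filtered
-- line list (alternative decomposition, same return value).

-- Python's str * int (repetition; a non-positive count gives ''): shared primitive used by both ports.
def pvStrMul (cs : List Char) (n : Int) : List Char := (List.replicate n.toNat cs).flatten

-- ===== PORT A =====
-- _makeIndentSpace(level) = '  ' * level
def pvMakeIndentSpace (level : Int) : List Char := pvStrMul "  ".toList level

-- literal port of A: split on '\n', one stateful pass carrying (newCodeStr, indentLevel), final strip.
-- cleanLine[0] / cleanLine[-1] are read as head?/getLast? — exact, since the reads run only on nonempty cleanLine.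
def autoIndent (codeStr : String) : String :=
  let lines := PySem.Chars.splitOn codeStr.toList ['\n']
  let st := lines.foldl (fun (st : List Char × Int) line =>
      let cleanLine := PySem.Chars.strip line
      if cleanLine = [] then st
      else
        let indentLevel := if cleanLine.head? = some '}' then st.2 - 1 else st.2
        let newLine := pvMakeIndentSpace indentLevel ++ cleanLine
        (st.1 ++ newLine ++ ['\n'],
         if cleanLine.getLast? = some '{' then indentLevel + 1 else indentLevel)) ([], 0)
  String.ofList (PySem.Chars.strip st.1)

-- ===== PORT B =====
-- literal port of Source B: stripped non-empty lines, per-line close/delta tables,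
-- indent of line i = '  ' * (sum(deltas[:i]) - closes[i]), join with '\n', strip.
def autoIndent_alt (codeStr : String) : String :=
  let lines := ((PySem.Chars.splitOn codeStr.toList ['\n']).map PySem.Chars.strip).filter (fun x => x ≠ [])
  let closes := lines.map (fun l => if l.head? = some '}' then (1 : Int) else 0)
  let deltas := List.zipWith (fun l c => (if l.getLast? = some '{' then (1 : Int) else 0) - c) lines closes
  let out := (List.range lines.length).map (fun i =>
      pvStrMul "  ".toList ((deltas.take i).sum - closes.getD i 0) ++ lines.getD i [])
  String.ofList (PySem.Chars.strip (PySem.Chars.join ['\n'] out))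

-- ===== PRECONDITION & SPEC =====
def Spec_autoIndent (codeStr : String) (out : String) : Prop := out = autoIndent_alt codeStr
instance (codeStr : String) (out : String) : Decidable (Spec_autoIndent codeStr out) := by unfold Spec_autoIndent; infer_instance

-- ===== CLAIM (what is proved, stated in full; the proofs are below) =====
def Claim_equal_autoIndent : Prop := ∀ (codeStr : String), Dom_autoIndent codeStr → Spec_autoIndent codeStr (autoIndent codeStr)

-- ===== LEMMAS AND PROOFS =====

-- A's loop body, named so the loop invariant can be stated (definitionally A's lambda)
def pvStepA (st : List Char × Int) (line : List Char) : List Char × Int :=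
  let cleanLine := PySem.Chars.strip line
  if cleanLine = [] then st
  else
    let indentLevel := if cleanLine.head? = some '}' then st.2 - 1 else st.2
    let newLine := pvMakeIndentSpace indentLevel ++ cleanLine
    (st.1 ++ newLine ++ ['\n'],
     if cleanLine.getLast? = some '{' then indentLevel + 1 else indentLevel)

def pvCloseOf (l : List Char) : Int := if l.head? = some '}' then 1 else 0
def pvOpenOf (l : List Char) : Int := if l.getLast? = some '{' then 1 else 0
def pvDeltaOf (l : List Char) : Int := pvOpenOf l - pvCloseOf l

-- the rendered (indented) lines, one per cleaned non-empty line, threading the indent level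
def pvPieces : List (List Char) → Int → List (List Char)
  | [], _ => []
  | c :: rest, lvl =>
      (pvStrMul "  ".toList (lvl - pvCloseOf c) ++ c)
        :: pvPieces rest (lvl - pvCloseOf c + pvOpenOf c)

-- A's loop, from any state over any line list, emits exactly the pieces (each '\n'-terminated)
lemma foldA_pieces (lines : List (List Char)) (acc : List Char) (lvl : Int) :
    lines.foldl pvStepA (acc, lvl)
    = (acc ++ ((pvPieces ((lines.map PySem.Chars.strip).filter (fun x => x ≠ [])) lvl).map (· ++ ['\n'])).flatten,
       lvl + (((lines.map PySem.Chars.strip).filter (fun x => x ≠ [])).map pvDeltaOf).sum) := by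
  induction lines generalizing acc lvl with
  | nil => simp [pvPieces]
  | cons l rest ih =>
    rw [List.foldl_cons]
    by_cases hc : PySem.Chars.strip l = []
    · rw [show pvStepA (acc, lvl) l = (acc, lvl) from by simp [pvStepA, hc], ih]
      simp [hc]
    · rw [show pvStepA (acc, lvl) l
          = (acc ++ (pvStrMul "  ".toList (lvl - pvCloseOf (PySem.Chars.strip l)) ++ PySem.Chars.strip l) ++ ['\n'],
             lvl - pvCloseOf (PySem.Chars.strip l) + pvOpenOf (PySem.Chars.strip l)) from by
        simp only [pvStepA, pvCloseOf, pvOpenOf, pvMakeIndentSpace, if_neg hc]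
        split_ifs <;> simp, ih]
      simp only [List.map_cons, List.filter_cons, decide_not, hc, decide_false, Bool.not_false,
        if_true, pvPieces, List.flatten_cons, pvDeltaOf, List.sum_cons]
      refine Prod.ext ?_ ?_
      · simp [List.append_assoc]
      · simp only []
        ring

-- B's range/prefix-sum map renders the same pieces (generalized over the starting level)
lemma range_map_pieces (ls : List (List Char)) (lvl : Int) :
    (List.range ls.length).map (fun i =>
        pvStrMul "  ".toList (lvl + ((ls.map pvDeltaOf).take i).sum - (ls.map pvCloseOf).getD i 0)
          ++ ls.getD i [])
    = pvPieces ls lvl := by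
  induction ls generalizing lvl with
  | nil => simp [pvPieces]
  | cons c rest ih =>
    simp only [List.length_cons, List.range_succ_eq_map, List.map_cons, List.map_map]
    rw [pvPieces]
    congr 1
    · simp
    · rw [← ih (lvl - pvCloseOf c + pvOpenOf c)]
      apply List.map_congr_left
      intro i _
      simp only [Function.comp, List.take_succ_cons, List.sum_cons, List.getD_cons_succ]
      congr 2
      simp only [pvDeltaOf]
      ring

lemma strip_append_newline (x : List Char) :
    PySem.Chars.strip (x ++ ['\n']) = PySem.Chars.strip x := by
  simp only [PySem.Chars.strip, PySem.Chars.rstrip, PySem.Chars.lstrip, List.dropWhile_append]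
  split_ifs with h
  · have hx : List.dropWhile PySem.Chars.isspace x = [] := List.isEmpty_iff.mp h
    simp [hx, PySem.Chars.isspace]
  · simp [PySem.Chars.isspace]

lemma flatten_eq_join_append (ps : List (List Char)) (hps : ps ≠ []) :
    ((ps.map (· ++ ['\n'])).flatten) = PySem.Chars.join ['\n'] ps ++ ['\n'] := by
  induction ps with
  | nil => exact absurd rfl hps
  | cons a t ih =>
    cases t with
    | nil => simp [PySem.Chars.join_singleton]
    | cons b t' =>
      rw [List.map_cons, List.flatten_cons, ih (by simp), PySem.Chars.join_cons_cons]
      simp [List.append_assoc]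

-- the two assemblies ('\n'-terminated lines vs '\n'-joined lines) strip to the same string
lemma strip_flatten_eq_strip_join (ps : List (List Char)) :
    PySem.Chars.strip ((ps.map (· ++ ['\n'])).flatten)
      = PySem.Chars.strip (PySem.Chars.join ['\n'] ps) := by
  cases ps with
  | nil => simp [PySem.Chars.join_nil]
  | cons a t => rw [flatten_eq_join_append _ (by simp), strip_append_newline]

lemma zipWith_close_eq_map_delta (ls : List (List Char)) :
    List.zipWith (fun l c => (if l.getLast? = some '{' then (1 : Int) else 0) - c) ls
      (ls.map (fun l => if l.head? = some '}' then (1 : Int) else 0)) = ls.map pvDeltaOf := by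
  induction ls with
  | nil => rfl
  | cons a t ih => simp [pvDeltaOf, pvOpenOf, pvCloseOf, ih]

lemma range_map_pieces_zero (ls : List (List Char)) :
    (List.range ls.length).map (fun i =>
        pvStrMul "  ".toList (((ls.map pvDeltaOf).take i).sum - (ls.map pvCloseOf).getD i 0)
          ++ ls.getD i [])
    = pvPieces ls 0 := by
  rw [← range_map_pieces ls 0]
  simp

-- B's whole rendering map, as written in the port, equals the pieces at level 0
lemma alt_map_eq_pieces (ls : List (List Char)) :
    (List.range ls.length).map (fun i =>
        pvStrMul "  ".toList
          (((List.zipWith (fun l c => (if l.getLast? = some '{' then (1 : Int) else 0) - c) ls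
              (ls.map (fun l => if l.head? = some '}' then (1 : Int) else 0))).take i).sum
            - (ls.map (fun l => if l.head? = some '}' then (1 : Int) else 0)).getD i 0)
          ++ ls.getD i [])
    = pvPieces ls 0 := by
  rw [zipWith_close_eq_map_delta,
    show (ls.map (fun l => if l.head? = some '}' then (1 : Int) else 0)) = ls.map pvCloseOf from rfl,
    range_map_pieces_zero]

-- ===== VERDICT (by name: the statement is the Claim_ definition above) =====
theorem autoIndent_spec : Claim_equal_autoIndent := by
  intro codeStr _
  unfold Spec_autoIndent
  have hA : autoIndent codeStr = String.ofList (PySem.Chars.strip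
      ([] ++ ((pvPieces (((PySem.Chars.splitOn codeStr.toList ['\n']).map PySem.Chars.strip).filter (fun x => x ≠ [])) 0).map (fun x => x ++ ['\n'])).flatten)) := by
    show String.ofList (PySem.Chars.strip
        (((PySem.Chars.splitOn codeStr.toList ['\n']).foldl pvStepA ([], 0)).1)) = _
    rw [foldA_pieces]
  have hB : autoIndent_alt codeStr = String.ofList (PySem.Chars.strip (PySem.Chars.join ['\n']
      (pvPieces (((PySem.Chars.splitOn codeStr.toList ['\n']).map PySem.Chars.strip).filter (fun x => x ≠ [])) 0))) := by
    show String.ofList (PySem.Chars.strip (PySem.Chars.join ['\n']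
      ((List.range (((PySem.Chars.splitOn codeStr.toList ['\n']).map PySem.Chars.strip).filter (fun x => x ≠ [])).length).map (fun i =>
        pvStrMul "  ".toList
          (((List.zipWith (fun l c => (if l.getLast? = some '{' then (1 : Int) else 0) - c)
              (((PySem.Chars.splitOn codeStr.toList ['\n']).map PySem.Chars.strip).filter (fun x => x ≠ []))
              ((((PySem.Chars.splitOn codeStr.toList ['\n']).map PySem.Chars.strip).filter (fun x => x ≠ [])).map (fun l => if l.head? = some '}' then (1 : Int) else 0))).take i).sum
            - ((((PySem.Chars.splitOn codeStr.toList ['\n']).map PySem.Chars.strip).filter (fun x => x ≠ [])).map (fun l => if l.head? = some '}' then (1 : Int) else 0)).getD i 0)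
          ++ (((PySem.Chars.splitOn codeStr.toList ['\n']).map PySem.Chars.strip).filter (fun x => x ≠ [])).getD i [])))) = _
    rw [alt_map_eq_pieces]
  rw [hA, hB, List.nil_append, strip_flatten_eq_strip_join]
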